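-- pv_equiv track=rewrite | github.com/Robertobappe/Introdu-o-Ci-ncia-da-Computa-o-com-Python-Parte-2 | recursao_soma.py | soma_lista
-- ===== SOURCE A (Python) =====
-- def soma_lista(lista):
--     a=len(lista)-1
--
--     if a == 0:
--         return lista[0]
--     elif a == 1:
--         return lista[0] + lista[1]
--
--     else:
--         soma=lista[0]+lista[1]
--         lista.remove(lista[0])
--         lista.remove(lista[0])
--         soma += soma_lista(lista)
--         return soma
-- ===== SOURCE B (Python) =====
-- def soma_lista(lista):
--     # Iterative accumulator loop; mutates lista in place (deletes pairs from the front) like A.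
--     total = 0
--     while True:
--         a = len(lista) - 1
--         if a == 0:
--             return total + lista[0]
--         if a == 1:
--             return total + lista[0] + lista[1]
--         total += lista[0] + lista[1]
--         del lista[0]
--         del lista[0]
-- ===== Notes on version B (the rewrite author's own statement) =====
-- stated objective: simpler
-- what changed: Replaces the non-tail recursion with an iterative while-loop carrying an explicit accumulator (same front-pair consumption, same in-place deletion of the two front elements).
import Mathlib
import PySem

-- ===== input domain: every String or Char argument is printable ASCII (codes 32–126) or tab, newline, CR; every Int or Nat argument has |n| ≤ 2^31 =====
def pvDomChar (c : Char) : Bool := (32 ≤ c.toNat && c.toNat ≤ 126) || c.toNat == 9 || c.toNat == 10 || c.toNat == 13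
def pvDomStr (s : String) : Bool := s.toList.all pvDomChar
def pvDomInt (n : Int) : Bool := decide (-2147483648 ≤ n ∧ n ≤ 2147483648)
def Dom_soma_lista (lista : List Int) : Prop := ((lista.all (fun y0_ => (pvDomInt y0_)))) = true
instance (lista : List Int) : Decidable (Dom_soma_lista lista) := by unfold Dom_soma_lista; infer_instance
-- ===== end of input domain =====

-- B replaces A's non-tail recursion by an iterative accumulator loop (same in-place front-pair consumption); equivalence is about the return value — both A and B also mutate `lista` in place in Python.


-- ===== PORT A =====
-- A: if len-1==0 return l[0]; if len-1==1 return l[0]+l[1]; else sum front pair,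
-- remove the two front elements (remove(lista[0]) deletes index 0) and recurse.
-- On [] the Python raises IndexError (excluded by Pre_); the port returns 0 there.
def soma_lista (lista : List Int) : Int :=
  match lista with
  | [x] => x
  | [x, y] => x + y
  | x :: y :: rest => x + y + soma_lista rest
  | [] => 0

-- ===== PORT B =====
-- B: while-loop with accumulator `total`, consuming two front elements per step.
def somaLoop (total : Int) (lista : List Int) : Int :=
  match lista with
  | [] => total
  | x :: rest =>
    match rest with
    | [] => total + x
    | y :: rest2 =>
      match rest2 with
      | [] => total + x + y
      | _ :: _ => somaLoop (total + x + y) rest2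

def soma_lista_alt (lista : List Int) : Int := somaLoop 0 lista

-- ===== PRECONDITION & SPEC =====
-- Pre_ excludes the empty list, on which both Pythons raise IndexError.
def Pre_soma_lista (lista : List Int) : Prop := lista ≠ []
instance (lista : List Int) : Decidable (Pre_soma_lista lista) := by unfold Pre_soma_lista; infer_instance
def pvWitness_soma_lista : List Int := ([3, -1, 4])

def Spec_soma_lista (lista : List Int) (out : Int) : Prop := out = soma_lista_alt lista
instance (lista : List Int) (out : Int) : Decidable (Spec_soma_lista lista out) := by unfold Spec_soma_lista; infer_instance

-- ===== CLAIM (what is proved, stated in full; the proofs are below) =====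
def Claim_equal_soma_lista : Prop := ∀ (lista : List Int), Dom_soma_lista lista → Pre_soma_lista lista → Spec_soma_lista lista (soma_lista lista)

-- ===== LEMMAS AND PROOFS =====
theorem loop_eq (lista : List Int) : ∀ (total : Int), somaLoop total lista = total + soma_lista lista := by
  induction lista using soma_lista.induct with
  | case1 x => intro t; simp [somaLoop, soma_lista]
  | case2 x y => intro t; simp [somaLoop, soma_lista]; ring
  | case3 x y rest hne ih =>
      intro t
      rcases rest with _ | ⟨z, rs⟩
      · exact absurd rfl hne
      · show somaLoop (t + x + y) (z :: rs) = t + (x + y + soma_lista (z :: rs))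
        rw [ih]
        ring
  | case4 => intro t; simp [somaLoop, soma_lista]

-- ===== VERDICT (by name: the statement is the Claim_ definition above) =====
theorem soma_lista_spec : Claim_equal_soma_lista := by
  intro lista _ _
  unfold Spec_soma_lista soma_lista_alt
  rw [loop_eq]
  ring
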